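-- pv_equiv track=rewrite | github.com/pc5401/my_BOJ | 백준/Gold/1222. 홍준 프로그래밍 대회/홍준 프로그래밍 대회.py | solve
-- ===== SOURCE A (Python) =====
-- def solve(schools: list[int]) -> int:
--     max_s = max(schools)
--     freq = [0] * (max_s + 1)
--     for s in schools:
--         freq[s] += 1
--
--     cnt = [0] * (max_s + 1)
--     # 배수 합을 통해 cnt를 계산
--     for T in range(1, max_s + 1):
--         for multiple in range(T, max_s + 1, T):
--             cnt[T] += freq[multiple]
--
--     ans = 0
--     for T in range(1, max_s + 1):
--         if cnt[T] >= 2: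
--             total = T * cnt[T]
--             if total > ans:
--                 ans = total
--     return ans
-- ===== SOURCE B (Python) =====
-- def solve(schools: list[int]) -> int:
--     # Same frequency table as before, but instead of sieving over the multiples of every
--     # candidate T, enumerate each occurring value's divisors by trial division up to sqrt(v)
--     # and distribute freq[v] onto both members of each divisor pair.
--     max_s = max(schools)
--     freq = [0] * (max_s + 1)
--     for s in schools:
--         freq[s] += 1
--     cnt = [0] * (max_s + 1)
--     for v in range(1, max_s + 1):
--         f = freq[v]
--         if f != 0:
--             d = 1
--             while d * d <= v:
--                 if v % d == 0:
--                     cnt[d] += f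
--                     e = v // d
--                     if e != d:
--                         cnt[e] += f
--                 d += 1
--     ans = 0
--     for T in range(1, max_s + 1):
--         if cnt[T] >= 2:
--             ans = max(ans, T * cnt[T])
--     return ans
-- ===== Notes on version B (the rewrite author's own statement) =====
-- stated objective: alternative
-- what changed: Keeps the frequency table but replaces A's harmonic sieve (for every T, sum freq over all multiples of T) by divisor enumeration: for each value v with nonzero frequency, trial-divide up to sqrt(v) and add freq[v] to cnt at both members of each divisor pair; the final scan accumulates with max().
-- outside the precondition, e.g. on solve([]): A raises ValueError, B raises ValueError; on solve([1, -5]): A raises IndexError, B raises IndexError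
import Mathlib
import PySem

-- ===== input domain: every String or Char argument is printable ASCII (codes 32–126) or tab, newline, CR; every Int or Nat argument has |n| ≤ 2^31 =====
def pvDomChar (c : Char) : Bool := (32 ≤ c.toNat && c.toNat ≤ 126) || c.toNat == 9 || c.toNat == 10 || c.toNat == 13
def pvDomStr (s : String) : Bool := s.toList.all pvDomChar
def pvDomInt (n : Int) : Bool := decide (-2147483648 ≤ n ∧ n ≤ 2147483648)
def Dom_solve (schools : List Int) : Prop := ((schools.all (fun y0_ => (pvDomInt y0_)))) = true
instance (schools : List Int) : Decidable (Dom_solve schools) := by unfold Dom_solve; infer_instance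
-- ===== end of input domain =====

-- B keeps A's frequency table but replaces the sieve over the multiples of every candidate T by
-- divisor enumeration (trial division up to the square root) of each occurring value.
-- Both ports store their tables in Lean Arrays (same values as the Python lists, updated in place).

-- Python list read/write  t[i]  /  t[i] = v  (negative index from the end; out of range = the
-- raising case, excluded by Pre_solve, where these totalizations return 0 / leave t unchanged)
def arrGet (a : Array Int) (i : Int) : Int :=
  let j := if i < 0 then i + a.size else i
  if 0 ≤ j then a.getD j.toNat 0 else 0

def arrSet (a : Array Int) (i : Int) (v : Int) : Array Int :=
  let j := if i < 0 then i + a.size else i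
  if 0 ≤ j then a.setIfInBounds j.toNat v else a

-- ===== PORT A =====
def solve (schools : List Int) : Int :=
  match PySem.List.max? schools (fun y => y) with
  | none => 0   -- max([]) raises ValueError; excluded by Pre_solve
  | some maxS =>
    let freq := schools.foldl (fun f s => arrSet f s (arrGet f s + 1))
      (Array.replicate (maxS + 1).toNat 0)
    let cnt := (PySem.List.pyRange 1 (maxS + 1) 1).foldl (fun c T =>
      (PySem.List.pyRange T (maxS + 1) T).foldl (fun c mlt =>
        arrSet c T (arrGet c T + arrGet freq mlt)) c)
      (Array.replicate (maxS + 1).toNat 0)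
    (PySem.List.pyRange 1 (maxS + 1) 1).foldl (fun ans T =>
      if 2 ≤ arrGet cnt T then
        if T * arrGet cnt T > ans then T * arrGet cnt T else ans
      else ans) 0

-- ===== PORT B =====
-- Source B's 'while d * d <= v' trial-division loop; the fuel (v + 1 - d).toNat is exact (the guard
-- is false when it reaches 0), so this is precisely the while loop, made structural for the kernel
def divLoopAuxA (fuel : Nat) (v : Int) (d : Int) (f : Int) (c : Array Int) : Array Int :=
  match fuel with
  | 0 => c
  | fuel + 1 =>
    if d * d ≤ v then
      let c' := if PySem.Int.mod v d = 0 then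
          let c1 := arrSet c d (arrGet c d + f)
          let e := PySem.Int.floordiv v d
          if e ≠ d then arrSet c1 e (arrGet c1 e + f) else c1
        else c
      divLoopAuxA fuel v (d + 1) f c'
    else c

def divLoopA (v : Int) (d : Int) (f : Int) (c : Array Int) : Array Int :=
  divLoopAuxA (v + 1 - d).toNat v d f c

def solve_alt (schools : List Int) : Int :=
  match PySem.List.max? schools (fun y => y) with
  | none => 0   -- max([]) raises ValueError; excluded by Pre_solve
  | some maxS =>
    let freq := schools.foldl (fun f s => arrSet f s (arrGet f s + 1))
      (Array.replicate (maxS + 1).toNat 0)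
    let cnt := (PySem.List.pyRange 1 (maxS + 1) 1).foldl (fun c v =>
      if arrGet freq v ≠ 0 then divLoopA v 1 (arrGet freq v) c else c)
      (Array.replicate (maxS + 1).toNat 0)
    (PySem.List.pyRange 1 (maxS + 1) 1).foldl (fun ans T =>
      if 2 ≤ arrGet cnt T then max ans (T * arrGet cnt T) else ans) 0

-- ===== PRECONDITION & SPEC =====
-- Pre_ is exactly where the Python A returns normally: max([]) raises ValueError on the empty
-- list, and a value below -(max+1) raises IndexError while building the frequency table.
def Pre_solve (schools : List Int) : Prop :=
  schools ≠ [] ∧ 0 ≤ (PySem.List.max? schools (fun y => y)).getD 0 ∧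
    ∀ s ∈ schools, -((PySem.List.max? schools (fun y => y)).getD 0 + 1) ≤ s
instance (schools : List Int) : Decidable (Pre_solve schools) := by unfold Pre_solve; infer_instance

def pvWitness_solve : List Int := [3, 2, 6]

def Spec_solve (schools : List Int) (out : Int) : Prop := out = solve_alt schools
instance (schools : List Int) (out : Int) : Decidable (Spec_solve schools out) := by
  unfold Spec_solve; infer_instance

-- ===== CLAIM (what is proved, stated in full; the proofs are below) =====
def Claim_equal_solve : Prop := ∀ (schools : List Int), Dom_solve schools → Pre_solve schools → Spec_solve schools (solve schools)

-- ===== LEMMAS AND PROOFS =====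

lemma arrGet_eq (a : Array Int) (i : Int) : arrGet a i = PySem.List.pyGetD a.toList i 0 := by
  simp only [arrGet, PySem.List.pyGetD, PySem.List.pyGet?, PySem.List.pyIdx?, Array.length_toList]
  by_cases h0 : 0 ≤ i
  · rw [if_neg (by omega : ¬ i < 0), if_pos h0, if_pos h0]
    by_cases h1 : i < (a.size : Int)
    · rw [if_pos h1]
      have hlt : i.toNat < a.size := by omega
      simp [Array.getD, hlt, Array.getElem?_toList, Array.getElem?_eq_getElem hlt]
    · rw [if_neg h1]
      have hge : ¬ i.toNat < a.size := by omega
      simp [Array.getD, hge]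
  · rw [if_pos (by omega : i < 0), if_neg h0]
    by_cases h2 : -(a.size : Int) ≤ i
    · rw [if_pos h2, if_pos (by omega : (0 : Int) ≤ i + a.size),
        show a.size - (-i).toNat = (i + (a.size : Int)).toNat by omega]
      have hlt : (i + (a.size : Int)).toNat < a.size := by omega
      simp [Array.getD, hlt, Array.getElem?_toList, Array.getElem?_eq_getElem hlt]
    · rw [if_neg h2, if_neg (by omega : ¬ (0 : Int) ≤ i + a.size)]
      rfl

lemma arrSet_eq (a : Array Int) (i : Int) (v : Int) :
    (arrSet a i v).toList = PySem.List.pySetD a.toList i v := by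
  simp only [arrSet, PySem.List.pySetD, PySem.List.pySet?, PySem.List.pyIdx?, Array.length_toList]
  by_cases h0 : 0 ≤ i
  · rw [if_neg (by omega : ¬ i < 0), if_pos h0, if_pos h0]
    by_cases h1 : i < (a.size : Int)
    · rw [if_pos h1]
      simp [Array.toList_setIfInBounds]
    · rw [if_neg h1]
      have : a.size ≤ i.toNat := by omega
      simp [Array.setIfInBounds, this]
  · rw [if_pos (by omega : i < 0), if_neg h0]
    by_cases h2 : -(a.size : Int) ≤ i
    · rw [if_pos h2, if_pos (by omega : (0:Int) ≤ i + a.size)]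
      have hk : (i + (a.size : Int)).toNat = a.size - (-i).toNat := by omega
      rw [hk]
      simp [Array.toList_setIfInBounds]
    · rw [if_neg h2]
      by_cases h3 : 0 ≤ i + (a.size : Int)
      · omega
      · rw [if_neg h3]
        rfl

-- List-level models of the two mutated tables (pure proof devices)
def divLoopAux (fuel : Nat) (v : Int) (d : Int) (f : Int) (c : List Int) : List Int :=
  match fuel with
  | 0 => c
  | fuel + 1 =>
    if d * d ≤ v then
      let c' := if PySem.Int.mod v d = 0 then
          let c1 := PySem.List.pySetD c d (PySem.List.pyGetD c d 0 + f)
          let e := PySem.Int.floordiv v d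
          if e ≠ d then PySem.List.pySetD c1 e (PySem.List.pyGetD c1 e 0 + f) else c1
        else c
      divLoopAux fuel v (d + 1) f c'
    else c

def divLoop (v : Int) (d : Int) (f : Int) (c : List Int) : List Int :=
  divLoopAux (v + 1 - d).toNat v d f c

lemma foldl_sim {β : Type} (L : List β) (stepA : Array Int → β → Array Int)
    (stepL : List Int → β → List Int)
    (h : ∀ (a : Array Int) (b : β), (stepA a b).toList = stepL a.toList b)
    (a : Array Int) : (L.foldl stepA a).toList = L.foldl stepL a.toList := by
  induction L generalizing a with
  | nil => rfl
  | cons b L ih =>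
    rw [List.foldl_cons, List.foldl_cons, ih, h a b]

lemma divLoopAuxA_sim (fuel : Nat) (v d f : Int) (c : Array Int) :
    (divLoopAuxA fuel v d f c).toList = divLoopAux fuel v d f c.toList := by
  induction fuel generalizing d c with
  | zero => rfl
  | succ fuel ih =>
    rw [divLoopAuxA, divLoopAux]
    by_cases hdd : d * d ≤ v
    · rw [if_pos hdd, if_pos hdd, ih]
      congr 1
      by_cases hm : PySem.Int.mod v d = 0
      · simp only [if_pos hm]
        by_cases he : PySem.Int.floordiv v d ≠ d
        · rw [if_pos he, if_pos he]
          simp only [arrSet_eq, arrGet_eq]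
        · rw [if_neg he, if_neg he]
          simp only [arrSet_eq, arrGet_eq]
      · rw [if_neg hm, if_neg hm]
    · rw [if_neg hdd, if_neg hdd]

lemma divLoopA_sim (v d f : Int) (c : Array Int) :
    (divLoopA v d f c).toList = divLoop v d f c.toList := divLoopAuxA_sim _ v d f c

lemma getD_pySetD (c : List Int) (i : Int) (v : Int) (hi : 0 ≤ i) (hil : i < (c.length : Int))
    (j : Nat) (hj : j < c.length) :
    (PySem.List.pySetD c i v).getD j 0 = if (j : Int) = i then v else c.getD j 0 := by
  rw [PySem.List.pySetD_of_nonneg c v hi, List.getD_eq_getElem?_getD, List.getD_eq_getElem?_getD,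
    List.getElem?_set]
  split_ifs <;> first | rfl | (exfalso; omega) | simp

lemma freq_len (l : List Int) (f0 : List Int) :
    (l.foldl (fun f s => PySem.List.pySetD f s (PySem.List.pyGetD f s 0 + 1)) f0).length
      = f0.length := by
  induction l generalizing f0 with
  | nil => rfl
  | cons s l ih => rw [List.foldl_cons, ih, PySem.List.length_pySetD]

lemma nodup_pyRange_pos (a b st : Int) (hst : 0 < st) : (PySem.List.pyRange a b st).Nodup := by
  rw [PySem.List.pyRange_of_pos a b hst]
  apply List.Nodup.map _ (List.nodup_range)
  intro k1 k2 hk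
  have : st * (k1 : Int) = st * k2 := by linarith
  have := mul_left_cancel₀ (by omega : st ≠ 0) this
  omega

lemma pairwise_le_pyRange_pos (a b st : Int) (hst : 0 < st) :
    (PySem.List.pyRange a b st).Pairwise (· ≤ ·) := by
  rw [PySem.List.pyRange_of_pos a b hst]
  apply List.Pairwise.map
  swap
  · exact List.pairwise_lt_range
  · intro k1 k2 hk
    have : st * (k1 : Int) ≤ st * k2 := by
      apply mul_le_mul_of_nonneg_left (by exact_mod_cast hk.le) (by omega)
    omega

lemma divLoopAux_len (fuel : Nat) (v d f : Int) (c : List Int) :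
    (divLoopAux fuel v d f c).length = c.length := by
  induction fuel generalizing d c with
  | zero => rfl
  | succ fuel ih =>
    rw [divLoopAux]
    split_ifs <;> simp [ih, PySem.List.length_pySetD, apply_ite List.length]

lemma divLoop_len (v d f : Int) (c : List Int) : (divLoop v d f c).length = c.length :=
  divLoopAux_len _ v d f c

lemma ind_step (s d j : Int) (hs : 1 ≤ s) (hd : 1 ≤ d) (hdd : d * d ≤ s) (hdvd : d ∣ s)
    (e : Int) (hede : e * d = s) :
    (if j ∣ s ∧ d ≤ j ∧ d * j ≤ s then (1 : Int) else 0)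
      = (if j ∣ s ∧ d + 1 ≤ j ∧ (d + 1) * j ≤ s then (1 : Int) else 0)
        + (if j = d then 1 else 0) + (if e ≠ d ∧ j = e then 1 else 0) := by
  have he1 : 1 ≤ e := by nlinarith
  have hde : d ≤ e := by nlinarith
  by_cases hjd : j = d
  · subst hjd
    rw [if_pos (show j ∣ s ∧ j ≤ j ∧ j * j ≤ s from ⟨hdvd, le_refl _, hdd⟩),
      if_neg (show ¬ (j ∣ s ∧ j + 1 ≤ j ∧ (j + 1) * j ≤ s) by rintro ⟨-, h, -⟩; omega),
      if_pos rfl,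
      if_neg (show ¬ (e ≠ j ∧ j = e) by rintro ⟨hne, hje⟩; omega)]
    norm_num
  · by_cases hje : j = e
    · have hed : e ≠ d := fun h => hjd (hje.trans h)
      rw [if_pos (show j ∣ s ∧ d ≤ j ∧ d * j ≤ s from
            ⟨⟨d, by rw [hje]; exact hede.symm⟩, hje ▸ hde, by rw [hje]; nlinarith⟩),
        if_neg (show ¬ (j ∣ s ∧ d + 1 ≤ j ∧ (d + 1) * j ≤ s) by
            rintro ⟨-, -, h⟩; rw [hje] at h; nlinarith),
        if_neg hjd,
        if_pos (show e ≠ d ∧ j = e from ⟨hed, hje⟩)]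
      norm_num
    · rw [if_neg hjd, if_neg (show ¬ (e ≠ d ∧ j = e) by rintro ⟨-, hje'⟩; exact hje hje')]
      by_cases h1 : j ∣ s ∧ d ≤ j ∧ d * j ≤ s
      · obtain ⟨⟨p, hp⟩, hdj, hdjs⟩ := h1
        have hj1 : 1 ≤ j := by omega
        have hp1 : 1 ≤ p := by nlinarith
        have hdp : d ≤ p := by nlinarith
        have hpd : p ≠ d := by
          intro h
          subst h
          have h0 : (e - j) * p = 0 := by ring_nf; linarith [hede, hp]
          rcases mul_eq_zero.mp h0 with h' | h'
          · exact hje (by omega)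
          · omega
        have hdp1 : d + 1 ≤ p := by omega
        have hs2 : (d + 1) * j ≤ s := by nlinarith
        rw [if_pos (show j ∣ s ∧ d ≤ j ∧ d * j ≤ s from ⟨⟨p, hp⟩, hdj, hdjs⟩),
          if_pos (show j ∣ s ∧ d + 1 ≤ j ∧ (d + 1) * j ≤ s from ⟨⟨p, hp⟩, by omega, hs2⟩)]
        norm_num
      · rw [if_neg h1, if_neg (show ¬ (j ∣ s ∧ d + 1 ≤ j ∧ (d + 1) * j ≤ s) by
          rintro ⟨hdv, hdj, hdjs⟩
          exact h1 ⟨hdv, by omega, by nlinarith⟩)]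
        norm_num

lemma ind_step_nd (s d j : Int) (hs : 1 ≤ s) (hd : 1 ≤ d) (hdvd : ¬ d ∣ s) :
    (if j ∣ s ∧ d ≤ j ∧ d * j ≤ s then (1 : Int) else 0)
      = (if j ∣ s ∧ d + 1 ≤ j ∧ (d + 1) * j ≤ s then (1 : Int) else 0) := by
  by_cases h1 : j ∣ s ∧ d ≤ j ∧ d * j ≤ s
  · obtain ⟨⟨p, hp⟩, hdj, hdjs⟩ := h1
    have hjd : j ≠ d := by rintro rfl; exact hdvd ⟨p, hp⟩
    have hj1 : 1 ≤ j := by omega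
    have hp1 : 1 ≤ p := by nlinarith
    have hdp : d ≤ p := by nlinarith
    have hpd : p ≠ d := by
      intro h
      subst h
      exact hdvd ⟨j, by linarith [hp]⟩
    have hdp1 : d + 1 ≤ p := by omega
    have hs2 : (d + 1) * j ≤ s := by nlinarith
    rw [if_pos (show j ∣ s ∧ d ≤ j ∧ d * j ≤ s from ⟨⟨p, hp⟩, hdj, hdjs⟩)]
    rw [if_pos (show j ∣ s ∧ d + 1 ≤ j ∧ (d + 1) * j ≤ s from ⟨⟨p, hp⟩, by omega, hs2⟩)]
  · rw [if_neg h1, if_neg (by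
      rintro ⟨hdv, hdj, hdjs⟩
      exact h1 ⟨hdv, by omega, by nlinarith⟩)]

lemma ite_scale (f : Int) (P : Prop) [Decidable P] :
    (if P then f else 0) = f * (if P then 1 else 0) := by
  split_ifs <;> ring

lemma divLoopAux_char (fuel : Nat) (s d f : Int) (c : List Int) (hs : 1 ≤ s) (hd : 1 ≤ d)
    (hsc : s < (c.length : Int)) (hfuel : fuel = (s + 1 - d).toNat) :
    ∀ j : Nat, j < c.length →
      (divLoopAux fuel s d f c).getD j 0
        = c.getD j 0 + (if (j : Int) ∣ s ∧ d ≤ (j : Int) ∧ d * (j : Int) ≤ s then f else 0) := by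
  induction fuel generalizing d c with
  | zero =>
    intro j hj
    have hds : s + 1 ≤ d := by omega
    rw [divLoopAux, if_neg (show ¬ ((j : Int) ∣ s ∧ d ≤ (j : Int) ∧ d * (j : Int) ≤ s) by
      rintro ⟨-, hdj, hdjs⟩; nlinarith)]
    ring
  | succ fuel ih =>
    intro j hj
    rw [divLoopAux]
    by_cases hdd : d * d ≤ s
    · rw [if_pos hdd]
      have hds : d ≤ s := by nlinarith
      by_cases hm : PySem.Int.mod s d = 0
      · simp only [if_pos hm]
        have hdvd : d ∣ s := (PySem.Int.mod_eq_zero_iff_dvd s d).mp hm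
        have hed : PySem.Int.floordiv s d * d = s := by
          rw [PySem.Int.floordiv_eq_ediv_of_pos (by omega : (0 : Int) < d)]
          exact Int.ediv_mul_cancel hdvd
        set e := PySem.Int.floordiv s d with hedef
        have he1 : 1 ≤ e := by nlinarith
        have hde : d ≤ e := by nlinarith
        have hes : e ≤ s := by nlinarith
        set c1 := PySem.List.pySetD c d (PySem.List.pyGetD c d 0 + f) with hc1def
        have hc1len : c1.length = c.length := PySem.List.length_pySetD _ _ _
        set c' := if e ≠ d then PySem.List.pySetD c1 e (PySem.List.pyGetD c1 e 0 + f) else c1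
          with hc'def
        have hc'len : c'.length = c.length := by
          rw [hc'def]; split_ifs <;> simp [hc1len, PySem.List.length_pySetD]
        rw [ih (d + 1) c' (by omega) (by omega) (by omega) j (by omega)]
        have hc1get : ∀ k : Nat, k < c.length →
            c1.getD k 0 = c.getD k 0 + (if (k : Int) = d then f else 0) := by
          intro k hk
          rw [hc1def, getD_pySetD c d _ (by omega) (by omega) k hk,
            PySem.List.pyGetD_of_nonneg c 0 (by omega : (0 : Int) ≤ d)]
          split_ifs with h
          · rw [show d.toNat = k by omega]
          · ring
        have hc'get : c'.getD j 0 = c.getD j 0 + (if (j : Int) = d then f else 0)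
            + (if e ≠ d ∧ (j : Int) = e then f else 0) := by
          by_cases hne : e ≠ d
          · rw [hc'def, if_pos hne, getD_pySetD c1 e _ (by omega) (by omega) j (by omega),
              PySem.List.pyGetD_of_nonneg c1 0 (by omega : (0 : Int) ≤ e),
              hc1get e.toNat (by omega)]
            by_cases hje : (j : Int) = e
            · rw [if_pos hje, if_neg (show ¬ ((e.toNat : Int) = d) by omega),
                if_neg (show ¬ ((j : Int) = d) by omega), if_pos ⟨hne, hje⟩,
                show e.toNat = j by omega]
            · rw [if_neg hje, hc1get j hj,
                if_neg (show ¬ (e ≠ d ∧ (j : Int) = e) from fun hh => hje hh.2)]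
              ring
          · rw [hc'def, if_neg hne, hc1get j hj,
              if_neg (show ¬ (e ≠ d ∧ (j : Int) = e) from fun hh => hh.1 (not_not.mp hne))]
            ring
        rw [hc'get,
          ite_scale f ((j : Int) ∣ s ∧ d + 1 ≤ (j : Int) ∧ (d + 1) * (j : Int) ≤ s),
          ite_scale f ((j : Int) ∣ s ∧ d ≤ (j : Int) ∧ d * (j : Int) ≤ s),
          ite_scale f ((j : Int) = d), ite_scale f (e ≠ d ∧ (j : Int) = e),
          ind_step s d (j : Int) hs hd hdd hdvd e hed]
        ring
      · simp only [if_neg hm]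
        have hndvd : ¬ d ∣ s := fun h => hm ((PySem.Int.mod_eq_zero_iff_dvd s d).mpr h)
        rw [ih (d + 1) c (by omega) (by omega) (by omega) j hj,
          ite_scale f ((j : Int) ∣ s ∧ d + 1 ≤ (j : Int) ∧ (d + 1) * (j : Int) ≤ s),
          ite_scale f ((j : Int) ∣ s ∧ d ≤ (j : Int) ∧ d * (j : Int) ≤ s),
          ind_step_nd s d (j : Int) hs hd hndvd]
    · rw [if_neg hdd, if_neg (show ¬ ((j : Int) ∣ s ∧ d ≤ (j : Int) ∧ d * (j : Int) ≤ s) by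
        rintro ⟨-, hdj, hdjs⟩
        have : d * d ≤ d * (j : Int) := by nlinarith
        omega)]
      ring

lemma divLoop_char (s f : Int) (c : List Int) (hs : 1 ≤ s) (hsc : s < (c.length : Int)) :
    ∀ j : Nat, j < c.length →
      (divLoop s 1 f c).getD j 0
        = c.getD j 0 + (if (j : Int) ∣ s ∧ (j : Int) ≤ s then f else 0) := by
  intro j hj
  rw [divLoop, divLoopAux_char _ s 1 f c hs le_rfl hsc rfl j hj]
  congr 1
  by_cases hdvd : (j : Int) ∣ s
  · have hj1 : 1 ≤ (j : Int) := by
      rcases hdvd with ⟨k, hk⟩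
      by_contra h
      have : (j : Int) = 0 := by omega
      rw [this] at hk
      omega
    by_cases hjs : (j : Int) ≤ s
    · rw [if_pos ⟨hdvd, hj1, by omega⟩, if_pos ⟨hdvd, hjs⟩]
    · rw [if_neg (by rintro ⟨-, -, h⟩; omega), if_neg (by rintro ⟨-, h⟩; exact hjs h)]
  · rw [if_neg (fun hh => hdvd hh.1), if_neg (fun hh => hdvd hh.1)]

-- B's pass over the values 1..max
lemma cntB_char (freq : List Int) (L : List Int) (c : List Int)
    (hL : ∀ v ∈ L, 1 ≤ v ∧ v < (c.length : Int)) :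
    ∀ j : Nat, j < c.length →
      (L.foldl (fun c v =>
          if PySem.List.pyGetD freq v 0 ≠ 0 then divLoop v 1 (PySem.List.pyGetD freq v 0) c
          else c) c).getD j 0
        = c.getD j 0 + (L.map (fun v =>
            if (j : Int) ∣ v ∧ (j : Int) ≤ v then PySem.List.pyGetD freq v 0 else 0)).sum := by
  induction L generalizing c with
  | nil => intro j hj; simp
  | cons v L ih =>
    intro j hj
    obtain ⟨hv1, hvl⟩ := hL v List.mem_cons_self
    have hstep : ∀ c' : List Int, c'.length = c.length → ∀ j : Nat, j < c.length →
        ((if PySem.List.pyGetD freq v 0 ≠ 0 then divLoop v 1 (PySem.List.pyGetD freq v 0) c'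
          else c')).getD j 0
        = c'.getD j 0 + (if (j : Int) ∣ v ∧ (j : Int) ≤ v then PySem.List.pyGetD freq v 0
            else 0) := by
      intro c' hlen j' hj'
      by_cases hf : PySem.List.pyGetD freq v 0 ≠ 0
      · rw [if_pos hf, divLoop_char v _ c' hv1 (by omega) j' (by omega)]
      · rw [if_neg hf]
        have : PySem.List.pyGetD freq v 0 = 0 := not_not.mp hf
        rw [this]
        split_ifs <;> ring
    have hlen1 : ((if PySem.List.pyGetD freq v 0 ≠ 0
        then divLoop v 1 (PySem.List.pyGetD freq v 0) c else c)).length = c.length := by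
      split_ifs <;> simp [divLoop_len]
    rw [List.foldl_cons,
      ih _ (by intro x hx; rw [hlen1]; exact hL x (List.mem_cons_of_mem _ hx)) j (by omega),
      hstep c rfl j hj, List.map_cons, List.sum_cons]
    ring

lemma inner_len (L : List Int) (T : Int) (g : Int → Int) (c : List Int) :
    (L.foldl (fun c mlt => PySem.List.pySetD c T (PySem.List.pyGetD c T 0 + g mlt)) c).length
      = c.length := by
  induction L generalizing c with
  | nil => rfl
  | cons mlt L ih => rw [List.foldl_cons, ih, PySem.List.length_pySetD]

lemma inner_char (L : List Int) (T : Int) (g : Int → Int) (c : List Int)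
    (hT : 0 ≤ T) (hTl : T < (c.length : Int)) :
    ∀ j : Nat, j < c.length →
      (L.foldl (fun c mlt => PySem.List.pySetD c T (PySem.List.pyGetD c T 0 + g mlt)) c).getD j 0
        = c.getD j 0 + (if (j : Int) = T then (L.map g).sum else 0) := by
  induction L generalizing c with
  | nil => intro j hj; simp
  | cons mlt L ih =>
    intro j hj
    have hlen : (PySem.List.pySetD c T (PySem.List.pyGetD c T 0 + g mlt)).length = c.length :=
      PySem.List.length_pySetD _ _ _
    rw [List.foldl_cons, ih _ (by omega) j (by omega),
      getD_pySetD c T _ hT hTl j hj,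
      PySem.List.pyGetD_of_nonneg c 0 hT, List.map_cons, List.sum_cons]
    by_cases hjT : (j : Int) = T
    · simp only [if_pos hjT, show T.toNat = j by omega]
      try ring
    · simp only [if_neg hjT]
      try ring

lemma outer_char (freq : List Int) (M : Int) (L : List Int) (c : List Int) (hnd : L.Nodup)
    (hb : ∀ T ∈ L, 0 ≤ T ∧ T < (c.length : Int)) :
    ∀ j : Nat, j < c.length →
      (L.foldl (fun c T =>
          (PySem.List.pyRange T M T).foldl (fun c mlt =>
            PySem.List.pySetD c T (PySem.List.pyGetD c T 0 + PySem.List.pyGetD freq mlt 0)) c) c).getD j 0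
        = c.getD j 0 + (if (j : Int) ∈ L then
            ((PySem.List.pyRange (j : Int) M (j : Int)).map (fun k => PySem.List.pyGetD freq k 0)).sum else 0) := by
  induction L generalizing c with
  | nil => intro j hj; simp
  | cons T0 L ih =>
    intro j hj
    obtain ⟨hT00, hT0l⟩ := hb T0 List.mem_cons_self
    obtain ⟨hT0nm, hnd'⟩ := List.nodup_cons.mp hnd
    have hlen := inner_len (PySem.List.pyRange T0 M T0) T0
      (fun mlt => PySem.List.pyGetD freq mlt 0) c
    rw [List.foldl_cons,
      ih _ hnd' (by intro x hx; rw [hlen]; exact hb x (List.mem_cons_of_mem _ hx)) j (by omega),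
      inner_char _ T0 _ c hT00 hT0l j hj]
    by_cases hjT : (j : Int) = T0
    · rw [hjT, if_pos rfl, if_neg hT0nm, if_pos List.mem_cons_self]
      ring
    · simp only [List.mem_cons, hjT, false_or, if_false]
      ring

lemma sum_ite_filter (L : List Int) (p : Int → Prop) [DecidablePred p] (g : Int → Int) :
    (L.map (fun v => if p v then g v else 0)).sum
      = ((L.filter (fun v => decide (p v))).map g).sum := by
  induction L with
  | nil => rfl
  | cons a L ih =>
    by_cases h : p a <;> simp [List.filter_cons, h, ih]

-- the multiples of T in [1, m] are the T-stepped range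
lemma range_filter (T m : Int) (hT : 1 ≤ T) (hTm : T ≤ m) :
    (PySem.List.pyRange 1 (m + 1) 1).filter (fun v => decide (T ∣ v ∧ T ≤ v))
      = PySem.List.pyRange T (m + 1) T := by
  have hT0 : (0 : Int) < T := by omega
  apply List.Perm.eq_of_pairwise (le := fun a b : Int => a ≤ b)
  · intro a b _ _ h1 h2
    omega
  · exact ((PySem.List.pairwise_lt_pyRange_one 1 (m + 1)).filter _).imp le_of_lt
  · exact pairwise_le_pyRange_pos T (m + 1) T hT0
  · apply (List.perm_ext_iff_of_nodup
      ((PySem.List.nodup_pyRange_one 1 (m + 1)).filter _) (nodup_pyRange_pos T (m + 1) T hT0)).mpr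
    intro x
    rw [List.mem_filter, PySem.List.mem_pyRange_one, PySem.List.mem_pyRange_iff_of_pos hT0,
      decide_eq_true_eq]
    constructor
    · rintro ⟨⟨h1, h2⟩, hd, hle⟩
      exact ⟨hle, h2, dvd_sub hd (dvd_refl T)⟩
    · rintro ⟨h1, h2, h3⟩
      have hdx : T ∣ x := by
        have := dvd_add h3 (dvd_refl T)
        simpa using this
      exact ⟨⟨by omega, h2⟩, hdx, h1⟩

lemma final_eq (L : List Int) (f g : Int → Int) (hfg : ∀ T ∈ L, f T = g T) (a : Int) :
    L.foldl (fun ans T => if 2 ≤ f T then (if T * f T > ans then T * f T else ans) else ans) a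
      = L.foldl (fun ans T => if 2 ≤ g T then max ans (T * g T) else ans) a := by
  induction L generalizing a with
  | nil => rfl
  | cons T L ih =>
    rw [List.foldl_cons, List.foldl_cons, hfg T List.mem_cons_self]
    have hstep : (if 2 ≤ g T then (if T * g T > a then T * g T else a) else a)
        = (if 2 ≤ g T then max a (T * g T) else a) := by
      rw [max_def]
      split_ifs <;> omega
    rw [hstep]
    exact ih (fun x hx => hfg x (List.mem_cons_of_mem _ hx)) _

-- ===== VERDICT (by name: the statement is the Claim_ definition above) =====
theorem solve_spec : Claim_equal_solve := by
  intro schools hdom hpre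
  obtain ⟨hne, hpre2⟩ := hpre
  unfold Spec_solve
  cases hmx : PySem.List.max? schools (fun y => y) with
  | none => exact absurd ((PySem.List.max?_eq_none_iff _ _).mp hmx) hne
  | some m =>
    rw [hmx] at hpre2
    simp only [Option.getD_some] at hpre2
    obtain ⟨hm0, -⟩ := hpre2
    unfold solve solve_alt
    rw [hmx]
    simp only []
    set FA := schools.foldl (fun f s => arrSet f s (arrGet f s + 1))
      (Array.replicate (m + 1).toNat (0 : Int)) with hFAdef
    set F := schools.foldl (fun f s =>
      PySem.List.pySetD f s (PySem.List.pyGetD f s 0 + 1))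
      (List.replicate (m + 1).toNat (0 : Int)) with hFdef
    have hFL : FA.toList = F := by
      rw [hFAdef, hFdef,
        foldl_sim schools (fun f s => arrSet f s (arrGet f s + 1))
          (fun f s => PySem.List.pySetD f s (PySem.List.pyGetD f s 0 + 1))
          (fun a b => by rw [arrSet_eq, arrGet_eq]) _,
        Array.toList_replicate]
    set CA := (PySem.List.pyRange 1 (m + 1) 1).foldl (fun c T =>
      (PySem.List.pyRange T (m + 1) T).foldl (fun c mlt =>
        arrSet c T (arrGet c T + arrGet FA mlt)) c)
      (Array.replicate (m + 1).toNat (0 : Int)) with hCAdef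
    set CB := (PySem.List.pyRange 1 (m + 1) 1).foldl (fun c v =>
      if arrGet FA v ≠ 0 then divLoopA v 1 (arrGet FA v) c else c)
      (Array.replicate (m + 1).toNat (0 : Int)) with hCBdef
    have hCAL : CA.toList = (PySem.List.pyRange 1 (m + 1) 1).foldl (fun c T =>
        (PySem.List.pyRange T (m + 1) T).foldl (fun c mlt =>
          PySem.List.pySetD c T (PySem.List.pyGetD c T 0 + PySem.List.pyGetD F mlt 0)) c)
        (List.replicate (m + 1).toNat (0 : Int)) := by
      rw [hCAdef,
        foldl_sim (PySem.List.pyRange 1 (m + 1) 1)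
          (fun c T => (PySem.List.pyRange T (m + 1) T).foldl (fun c mlt =>
            arrSet c T (arrGet c T + arrGet FA mlt)) c)
          (fun c T => (PySem.List.pyRange T (m + 1) T).foldl (fun c mlt =>
            PySem.List.pySetD c T (PySem.List.pyGetD c T 0 + PySem.List.pyGetD F mlt 0)) c)
          (fun a T =>
            foldl_sim (PySem.List.pyRange T (m + 1) T)
              (fun c mlt => arrSet c T (arrGet c T + arrGet FA mlt))
              (fun c mlt => PySem.List.pySetD c T
                (PySem.List.pyGetD c T 0 + PySem.List.pyGetD F mlt 0))
              (fun a' mlt => by simp only [arrSet_eq, arrGet_eq, hFL]) a) _,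
        Array.toList_replicate]
    have hCBL : CB.toList = (PySem.List.pyRange 1 (m + 1) 1).foldl (fun c v =>
        if PySem.List.pyGetD F v 0 ≠ 0 then divLoop v 1 (PySem.List.pyGetD F v 0) c else c)
        (List.replicate (m + 1).toNat (0 : Int)) := by
      rw [hCBdef,
        foldl_sim (PySem.List.pyRange 1 (m + 1) 1)
          (fun c v => if arrGet FA v ≠ 0 then divLoopA v 1 (arrGet FA v) c else c)
          (fun c v => if PySem.List.pyGetD F v 0 ≠ 0
            then divLoop v 1 (PySem.List.pyGetD F v 0) c else c)
          (fun a v => by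
            simp only [arrGet_eq, hFL]
            split_ifs with h
            · exact divLoopA_sim v 1 (PySem.List.pyGetD F v 0) a
            · rfl) _,
        Array.toList_replicate]
    have hgetA : ∀ T : Int, arrGet CA T = PySem.List.pyGetD CA.toList T 0 := fun T => arrGet_eq CA T
    have hgetB : ∀ T : Int, arrGet CB T = PySem.List.pyGetD CB.toList T 0 := fun T => arrGet_eq CB T
    simp only [hgetA, hgetB, hCAL, hCBL]
    clear hgetA hgetB hCAL hCBL
    apply final_eq
    intro T hT
    rw [PySem.List.mem_pyRange_one] at hT
    obtain ⟨hT1, hTm1⟩ := hT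
    have hTm : T ≤ m := by omega
    have hFlen : (schools.foldl (fun f s =>
        PySem.List.pySetD f s (PySem.List.pyGetD f s 0 + 1))
        (List.replicate (m + 1).toNat (0 : Int))).length = (m + 1).toNat := by
      rw [freq_len, List.length_replicate]
    -- A's count at T: the sum of freq over the multiples of T
    have hA : PySem.List.pyGetD ((PySem.List.pyRange 1 (m + 1) 1).foldl (fun c T =>
        (PySem.List.pyRange T (m + 1) T).foldl (fun c mlt =>
          PySem.List.pySetD c T (PySem.List.pyGetD c T 0 + PySem.List.pyGetD F mlt 0)) c)
        (List.replicate (m + 1).toNat (0 : Int))) T 0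
        = ((PySem.List.pyRange T (m + 1) T).map (fun k => PySem.List.pyGetD F k 0)).sum := by
      rw [PySem.List.pyGetD_of_nonneg _ 0 (by omega : (0 : Int) ≤ T),
        outer_char F (m + 1) _ _ (PySem.List.nodup_pyRange_one 1 (m + 1)) (by
          intro x hx
          rw [PySem.List.mem_pyRange_one] at hx
          rw [List.length_replicate]
          omega) T.toNat (by rw [List.length_replicate]; omega),
        List.getD_replicate _ (by omega : T.toNat < (m + 1).toNat),
        show ((T.toNat : Int)) = T by omega,
        if_pos (PySem.List.mem_pyRange_one.mpr ⟨hT1, hTm1⟩), zero_add]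
    -- B's count at T: freq distributed over divisors, regrouped as the same sum
    have hB : PySem.List.pyGetD ((PySem.List.pyRange 1 (m + 1) 1).foldl (fun c v =>
        if PySem.List.pyGetD F v 0 ≠ 0 then divLoop v 1 (PySem.List.pyGetD F v 0) c else c)
        (List.replicate (m + 1).toNat (0 : Int))) T 0
        = ((PySem.List.pyRange T (m + 1) T).map (fun k => PySem.List.pyGetD F k 0)).sum := by
      rw [PySem.List.pyGetD_of_nonneg _ 0 (by omega : (0 : Int) ≤ T),
        cntB_char F _ _ (by
          intro v hv
          rw [PySem.List.mem_pyRange_one] at hv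
          rw [List.length_replicate]
          omega) T.toNat (by rw [List.length_replicate]; omega),
        List.getD_replicate _ (by omega : T.toNat < (m + 1).toNat), zero_add,
        show ((T.toNat : Int)) = T by omega,
        sum_ite_filter _ (fun v => T ∣ v ∧ T ≤ v) (fun v => PySem.List.pyGetD F v 0),
        range_filter T m hT1 hTm]
    rw [hA, hB]
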